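-- pv_equiv track=rewrite | github.com/yoavern/learning | python/boogle/ex11_utils.py | max_score_paths
-- ===== SOURCE A (Python) =====
-- from typing import List, Tuple, Iterable, Optional
--
-- Board = List[List[str]]
--
-- Path = List[Tuple[int, int]]
--
-- def gen_all_helper(word: str, path: list[tuple[int, int]], board: Board, words: Iterable[str],\
--      output_list: list[tuple[str, list[tuple[int, int]]]]) -> None:
--
--     new_words: set[str] = set()
--
--     for value in words:
--         if word == value:
--             value_to_add: tuple[str, list[tuple[int, int]]] = word, path
--             output_list.append(value_to_add)
--         elif word == value[:len(word)]:
--             new_words.add(value)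
--
--     # if a move is valid check a path with this move
--     if new_words:
--         for row in [-1, 0, 1]:
--             for col in [-1, 0, 1]:
--                 new_row: int = path[-1][0] + row
--                 new_col: int = path[-1][1] + col
--                 new_loc: tuple[int, int] = new_row, new_col
--                 if new_row < len(board) and new_row >= 0 and new_col < len(board[0]) and new_col >= 0 and new_loc not in path:
--                     gen_all_helper(word + board[new_row][new_col], path + [new_loc], board, new_words, output_list)
--
-- def gen_all(board: Board, words):
--     """
--         this function return all the valid words and paths on the board
--     """
--
--     all: list[list[tuple[str, list[tuple[int, int]]]]] = []
--
--     # checking all the cubes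
--     for row in range(len(board)):
--         for col in range(len(board[0])):
--             starting_location: tuple[int, int] = row, col
--             gen_all_helper(board[row][col], [starting_location], board, words, all)
--
--     return all
--
-- def max_score_paths(board: Board, words: Iterable[str]) -> List[Path]:
--     """
--         this function returns the paths that will give the player the max score
--     """
--
--     # generating all the valid paths and words using our efficent algorithem
--     all = sorted(gen_all(board, words))
--     paths: list[list[tuple[int, int]]] = []
--
--     # returning the longest path for each word
--     if all:
--         cur_word: str = all[0][0]
--         path_to_add: list[tuple[int, int]] = all[0][1]
--
--     ind: int = 0
--     while ind < len(all):
--         while ind < len(all) and all[ind][0] == cur_word :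
--             if len(all[ind][1]) > len(path_to_add):
--                 path_to_add = all[ind][1]
--             ind += 1
--
--         paths.append(path_to_add)
--         if ind < len(all):
--             cur_word = all[ind][0]
--             path_to_add = all[ind][1]
--
--     return paths
-- ===== SOURCE B (Python) =====
-- def max_score_paths(board, words):
--     rows = len(board)
--     cols = len(board[0]) if board else 0
--     result = []
--     for w in sorted(set(words)):
--         best = None
--
--         def consider(path):
--             nonlocal best
--             if best is None or len(path) > len(best) or (len(path) == len(best) and path < best):
--                 best = path
--
--         def dfs(r, c, i, path):
--             if i == len(w):
--                 consider(path)
--                 return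
--             for dr in (-1, 0, 1):
--                 for dc in (-1, 0, 1):
--                     nr, nc = r + dr, c + dc
--                     if 0 <= nr < rows and 0 <= nc < cols and (nr, nc) not in path:
--                         cell = board[nr][nc]
--                         if w[i:i + len(cell)] == cell:
--                             dfs(nr, nc, i + len(cell), path + [(nr, nc)])
--
--         for r in range(rows):
--             for c in range(cols):
--                 cell = board[r][c]
--                 if w[:len(cell)] == cell:
--                     dfs(r, c, len(cell), [(r, c)])
--         if best is not None:
--             result.append(best)
--     return result
-- ===== Notes on version B (the rewrite author's own statement) =====
-- stated objective: faster
-- what changed: B replaces A's DFS that re-scans and re-filters the whole remaining word set at every visited node (and then sorts all generated (word,path) pairs and scans groups) by a per-word DFS that matches one word character-by-character on the board and keeps a running best (longest, tie lexicographically smallest) path per word, emitting words in sorted order with no global pair sort.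
import Mathlib
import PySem

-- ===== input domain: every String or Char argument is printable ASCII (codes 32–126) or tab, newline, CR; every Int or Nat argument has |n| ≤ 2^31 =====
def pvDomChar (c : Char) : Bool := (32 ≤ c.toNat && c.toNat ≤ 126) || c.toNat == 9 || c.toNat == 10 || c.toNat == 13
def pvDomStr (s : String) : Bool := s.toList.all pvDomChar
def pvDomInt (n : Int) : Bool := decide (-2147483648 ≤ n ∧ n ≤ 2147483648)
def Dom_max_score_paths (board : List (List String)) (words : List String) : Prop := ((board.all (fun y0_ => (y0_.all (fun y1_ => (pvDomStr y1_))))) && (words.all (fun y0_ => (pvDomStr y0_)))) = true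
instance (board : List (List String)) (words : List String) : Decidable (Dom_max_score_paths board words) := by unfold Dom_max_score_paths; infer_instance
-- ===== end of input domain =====

-- B replaces A's filter-the-word-set DFS + global sort of all (word,path) pairs by a per-word
-- character-matching DFS with a running best path per word (objective: faster; measured).


-- ===== PORT A =====
-- board[r][c] as a char list (Python indexing; in range wherever it is reached under Pre_)
def pvCell (board : List (List String)) (r c : Int) : List Char :=
  (PySem.List.pyGetD (PySem.List.pyGetD board r []) c "").toList

-- len(board[0]) (only evaluated by Python when board is nonempty; 0 placeholder otherwise)
def pvCols (board : List (List String)) : Nat := (PySem.List.pyGetD board 0 []).length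

-- the 'for value in words' loop of gen_all_helper: strings are carried as char lists;
-- value[:len(word)] is List.take word.length (a nonnegative slice)
def pvWordLoop (word : List Char) (path : List (Int × Int)) (words : List (List Char))
    (out : List (List Char × List (Int × Int))) :
    List (List Char × List (Int × Int)) × PySem.Set (List Char) :=
  words.foldl (fun acc value =>
    if word = value then (acc.1 ++ [(word, path)], acc.2)
    else if word = value.take word.length then (acc.1, acc.2.add value)
    else acc) (out, ([] : PySem.Set (List Char)))

-- gen_all_helper; fuel is a termination guard only (a simple path visits each of the
-- rows*cols cells at most once, so with the initial fuel the 0 branch is unreachable)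
def genAllHelper (board : List (List String)) (fuel : Nat) (word : List Char)
    (path : List (Int × Int)) (words : List (List Char))
    (out : List (List Char × List (Int × Int))) : List (List Char × List (Int × Int)) :=
  let st := pvWordLoop word path words out
  if st.2 ≠ [] then
    match fuel with
    | 0 => st.1
    | fuel + 1 =>
      ([-1, 0, 1] : List Int).foldl (fun acc row =>
        ([-1, 0, 1] : List Int).foldl (fun acc col =>
          let lastq := PySem.List.pyGetD path (-1) ((0 : Int), (0 : Int))
          let nr : Int := lastq.1 + row
          let nc : Int := lastq.2 + col
          if nr < (board.length : Int) ∧ 0 ≤ nr ∧ nc < (pvCols board : Int) ∧ 0 ≤ nc ∧ (nr, nc) ∉ path then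
            genAllHelper board fuel (word ++ pvCell board nr nc) (path ++ [(nr, nc)]) st.2 acc
          else acc) acc) st.1
  else st.1
termination_by fuel

-- gen_all
def genAll (board : List (List String)) (words : List String) :
    List (List Char × List (Int × Int)) :=
  (PySem.List.pyRange 0 (board.length : Int) 1).foldl (fun all row =>
    (PySem.List.pyRange 0 (pvCols board : Int) 1).foldl (fun all col =>
      genAllHelper board (board.length * pvCols board) (pvCell board row col)
        [(row, col)] (words.map String.toList) all) all) []

-- a path [(r1,c1),(r2,c2),…] compared as the flat list [r1,c1,r2,c2,…]: Python's lexicographic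
-- order on lists of 2-tuples is exactly lexicographic order on the flattened lists
def pvPathKey (p : List (Int × Int)) : List Int := p.flatMap (fun q => [q.1, q.2])

-- Python's tuple order on (word, path) pairs for sorted(...), as an explicit lexicographic key
def pvKey (x : List Char × List (Int × Int)) : Lex (List Char × List Int) := toLex (x.1, pvPathKey x.2)

-- the inner 'while ind < len(all) and all[ind][0] == cur_word' loop: consumes matching pairs,
-- keeps the strictly longer path, returns (path_to_add, remaining pairs)
def scanInner (cw : List Char) (pta : List (Int × Int)) :
    List (List Char × List (Int × Int)) → List (Int × Int) × List (List Char × List (Int × Int))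
  | [] => (pta, [])
  | x :: t => if x.1 = cw then scanInner cw (if x.2.length > pta.length then x.2 else pta) t else (pta, x :: t)

-- termination bound for the outer while loop (cited in scanOuter's decreasing_by)
theorem scanInner_rest_length_le (cw : List Char) (pta : List (Int × Int))
    (l : List (List Char × List (Int × Int))) : (scanInner cw pta l).2.length ≤ l.length := by
  induction l generalizing pta with
  | nil => simp [scanInner]
  | cons x t ih =>
    by_cases h : x.1 = cw
    · simp only [scanInner, if_pos h]
      exact le_trans (ih _) (by simp)
    · simp [scanInner, h]

-- the outer while loop; at the top of each outer iteration Python's inner loop first re-reads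
-- the pair (cur_word, path_to_add) itself, a no-op, so the list argument starts after that pair
def scanOuter (cw : List Char) (pta : List (Int × Int))
    (l : List (List Char × List (Int × Int))) (paths : List (List (Int × Int))) :
    List (List (Int × Int)) :=
  match h : scanInner cw pta l with
  | (best, []) => paths ++ [best]
  | (best, x :: t) => scanOuter x.1 x.2 t (paths ++ [best])
termination_by l.length
decreasing_by
  have hle := scanInner_rest_length_le cw pta l
  rw [h] at hle
  simp at hle
  omega

def max_score_paths (board : List (List String)) (words : List String) : List (List (Int × Int)) :=
  let allS := PySem.List.sorted (genAll board words) pvKey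
  match allS with
  | [] => []
  | x :: rest => scanOuter x.1 x.2 rest []

-- ===== PORT B =====
-- per-word DFS of Source B: i chars of w are already matched by path, best is the running best;
-- fuel is a termination guard only (unreachable with the initial fuel, as for port A);
-- path < best on Python's lists of 2-tuples is < on the flattened key lists
def dfsB (board : List (List String)) (w : List Char) (fuel : Nat) (r c : Int) (i : Nat)
    (path : List (Int × Int)) (best : Option (List (Int × Int))) : Option (List (Int × Int)) :=
  if i = w.length then
    match best with
    | none => some path
    | some b =>
      if path.length > b.length ∨ (path.length = b.length ∧ pvPathKey path < pvPathKey b) then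
        some path
      else some b
  else
    match fuel with
    | 0 => best
    | fuel + 1 =>
      ([-1, 0, 1] : List Int).foldl (fun best dr =>
        ([-1, 0, 1] : List Int).foldl (fun best dc =>
          let nr : Int := r + dr
          let nc : Int := c + dc
          if 0 ≤ nr ∧ nr < (board.length : Int) ∧ 0 ≤ nc ∧ nc < (pvCols board : Int) ∧ (nr, nc) ∉ path then
            let cell := pvCell board nr nc
            if (w.drop i).take cell.length = cell then
              dfsB board w fuel nr nc (i + cell.length) (path ++ [(nr, nc)]) best
            else best
          else best) best) best
termination_by fuel

def max_score_paths_alt (board : List (List String)) (words : List String) : List (List (Int × Int)) :=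
  (PySem.List.sorted (PySem.Set.ofList words) (fun x => x)).foldl (fun result w =>
    let wc := w.toList
    let best := (PySem.List.pyRange 0 (board.length : Int) 1).foldl (fun best r =>
      (PySem.List.pyRange 0 (pvCols board : Int) 1).foldl (fun best c =>
        let cell := pvCell board r c
        if wc.take cell.length = cell then
          dfsB board wc (board.length * pvCols board) r c cell.length [(r, c)] best
        else best) best) none
    match best with
    | none => result
    | some b => result ++ [b]) []

-- ===== PRECONDITION & SPEC =====
-- Pre_ excludes exactly the boards with a row shorter than row 0, on which Python A raises
-- IndexError (gen_all indexes board[row][col] for every col < len(board[0])); B raises there too.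
def Pre_max_score_paths (board : List (List String)) (words : List String) : Prop :=
  ∀ row ∈ board, pvCols board ≤ row.length
instance (board : List (List String)) (words : List String) : Decidable (Pre_max_score_paths board words) := by unfold Pre_max_score_paths; infer_instance

def pvWitness_max_score_paths : List (List String) × List String := ([["a", "b"], ["c", "d"]], ["ab", "da"])

def Spec_max_score_paths (board : List (List String)) (words : List String) (out : List (List (Int × Int))) : Prop := out = max_score_paths_alt board words
instance (board : List (List String)) (words : List String) (out : List (List (Int × Int))) : Decidable (Spec_max_score_paths board words out) := by unfold Spec_max_score_paths; infer_instance

-- ===== CLAIM (what is proved, stated in full; the proofs are below) =====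
def Claim_equal_max_score_paths : Prop := ∀ (board : List (List String)) (words : List String), Dom_max_score_paths board words → Pre_max_score_paths board words → Spec_max_score_paths board words (max_score_paths board words)

-- ===== LEMMAS AND PROOFS =====


-- Layer 0: generic append-threaded fold lemmas
theorem pvFoldlExtends {ι X : Type} (g : List X → ι → List X)
    (hg : ∀ acc i, g acc i = acc ++ g [] i) :
    ∀ (l : List ι) (acc : List X), l.foldl g acc = acc ++ l.foldl g [] := by
  intro l
  induction l with
  | nil => simp
  | cons i t ih =>
    intro acc
    rw [List.foldl_cons, List.foldl_cons, hg, ih, ih (g [] i), List.append_assoc]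

theorem pvFoldlMem {ι X : Type} (g : List X → ι → List X)
    (hg : ∀ acc i, g acc i = acc ++ g [] i) (l : List ι) (acc : List X) (x : X) :
    x ∈ l.foldl g acc ↔ x ∈ acc ∨ ∃ i ∈ l, x ∈ g [] i := by
  induction l generalizing acc with
  | nil => simp
  | cons i t ih =>
    rw [List.foldl_cons, ih, hg]
    simp only [List.mem_append, List.mem_cons]
    constructor
    · rintro ((h | h) | ⟨j, hj, hx⟩)
      · exact Or.inl h
      · exact Or.inr ⟨i, Or.inl rfl, h⟩
      · exact Or.inr ⟨j, Or.inr hj, hx⟩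
    · rintro (h | ⟨j, (rfl | hj), hx⟩)
      · exact Or.inl (Or.inl h)
      · exact Or.inl (Or.inr hx)
      · exact Or.inr ⟨j, hj, hx⟩

-- Layer 1: the word loop
theorem pvWordLoop_split (word : List Char) (path : List (Int × Int)) :
    ∀ (ws : List (List Char)) (a1 : List (List Char × List (Int × Int))) (a2 : PySem.Set (List Char)),
    ws.foldl (fun acc value =>
      if word = value then (acc.1 ++ [(word, path)], acc.2)
      else if word = value.take word.length then (acc.1, acc.2.add value)
      else acc) (a1, a2)
    = (a1 ++ (ws.foldl (fun acc value =>
      if word = value then (acc.1 ++ [(word, path)], acc.2)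
      else if word = value.take word.length then (acc.1, acc.2.add value)
      else acc) (([] : List (List Char × List (Int × Int))), a2)).1,
       (ws.foldl (fun acc value =>
      if word = value then (acc.1 ++ [(word, path)], acc.2)
      else if word = value.take word.length then (acc.1, acc.2.add value)
      else acc) (([] : List (List Char × List (Int × Int))), a2)).2) := by
  intro ws
  induction ws with
  | nil => simp
  | cons v t ih =>
    intro a1 a2
    by_cases h1 : word = v
    · simp only [List.foldl_cons, if_pos h1, List.nil_append]
      rw [ih (a1 ++ [(word, path)]), ih [(word, path)]]
      simp
    · by_cases h2 : word = v.take word.length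
      · simp only [List.foldl_cons, if_neg h1, if_pos h2, List.nil_append]
        rw [ih]
      · simp only [List.foldl_cons, if_neg h1, if_neg h2]
        rw [ih]

theorem pvWordLoop_mem_aux (word : List Char) (path : List (Int × Int)) :
    ∀ (ws : List (List Char)) (a1 : List (List Char × List (Int × Int))) (a2 : PySem.Set (List Char)),
    (∀ x, x ∈ (ws.foldl (fun acc value =>
      if word = value then (acc.1 ++ [(word, path)], acc.2)
      else if word = value.take word.length then (acc.1, acc.2.add value)
      else acc) (a1, a2)).1 ↔ x ∈ a1 ∨ (word ∈ ws ∧ x = (word, path))) ∧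
    (∀ v, v ∈ (ws.foldl (fun acc value =>
      if word = value then (acc.1 ++ [(word, path)], acc.2)
      else if word = value.take word.length then (acc.1, acc.2.add value)
      else acc) (a1, a2)).2 ↔ v ∈ a2 ∨ (v ∈ ws ∧ word ≠ v ∧ word = v.take word.length)) := by
  intro ws
  induction ws with
  | nil => simp
  | cons v t ih =>
    intro a1 a2
    by_cases h1 : word = v
    · simp only [List.foldl_cons, if_pos h1]
      obtain ⟨ihf, ihs⟩ := ih (a1 ++ [(word, path)]) a2
      constructor
      · intro x
        rw [ihf x]
        simp only [List.mem_append, List.mem_cons, List.not_mem_nil, or_false]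
        subst h1
        tauto
      · intro u
        rw [ihs u]
        simp only [List.mem_cons]
        constructor
        · rintro (h | ⟨hm, hne, ht⟩)
          · exact Or.inl h
          · exact Or.inr ⟨Or.inr hm, hne, ht⟩
        · rintro (h | ⟨(rfl | hm), hne, ht⟩)
          · exact Or.inl h
          · exact absurd h1 hne
          · exact Or.inr ⟨hm, hne, ht⟩
    · by_cases h2 : word = v.take word.length
      · simp only [List.foldl_cons, if_neg h1, if_pos h2]
        obtain ⟨ihf, ihs⟩ := ih a1 (a2.add v)
        constructor
        · intro x
          rw [ihf x]
          simp only [List.mem_cons]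
          constructor
          · rintro (h | ⟨hm, hx⟩)
            · exact Or.inl h
            · exact Or.inr ⟨Or.inr hm, hx⟩
          · rintro (h | ⟨(rfl | hm), hx⟩)
            · exact Or.inl h
            · exact absurd rfl h1
            · exact Or.inr ⟨hm, hx⟩
        · intro u
          rw [ihs u, PySem.Set.mem_add]
          simp only [List.mem_cons]
          constructor
          · rintro ((h | rfl) | ⟨hm, hne, ht⟩)
            · exact Or.inl h
            · exact Or.inr ⟨Or.inl rfl, h1, h2⟩
            · exact Or.inr ⟨Or.inr hm, hne, ht⟩
          · rintro (h | ⟨(rfl | hm), hne, ht⟩)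
            · exact Or.inl (Or.inl h)
            · exact Or.inl (Or.inr rfl)
            · exact Or.inr ⟨hm, hne, ht⟩
      · simp only [List.foldl_cons, if_neg h1, if_neg h2]
        obtain ⟨ihf, ihs⟩ := ih a1 a2
        constructor
        · intro x
          rw [ihf x]
          simp only [List.mem_cons]
          constructor
          · rintro (h | ⟨hm, hx⟩)
            · exact Or.inl h
            · exact Or.inr ⟨Or.inr hm, hx⟩
          · rintro (h | ⟨(rfl | hm), hx⟩)
            · exact Or.inl h
            · exact absurd rfl h1
            · exact Or.inr ⟨hm, hx⟩
        · intro u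
          rw [ihs u]
          simp only [List.mem_cons]
          constructor
          · rintro (h | ⟨hm, hne, ht⟩)
            · exact Or.inl h
            · exact Or.inr ⟨Or.inr hm, hne, ht⟩
          · rintro (h | ⟨(rfl | hm), hne, ht⟩)
            · exact Or.inl h
            · exact absurd ht h2
            · exact Or.inr ⟨hm, hne, ht⟩

theorem pvWordLoop_fst_mem (word : List Char) (path : List (Int × Int))
    (ws : List (List Char)) (out : List (List Char × List (Int × Int))) (x : List Char × List (Int × Int)) :
    x ∈ (pvWordLoop word path ws out).1 ↔ x ∈ out ∨ (word ∈ ws ∧ x = (word, path)) :=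
  (pvWordLoop_mem_aux word path ws out []).1 x

theorem pvWordLoop_snd_mem (word : List Char) (path : List (Int × Int))
    (ws : List (List Char)) (out : List (List Char × List (Int × Int))) (v : List Char) :
    v ∈ (pvWordLoop word path ws out).2 ↔ v ∈ ws ∧ word ≠ v ∧ word = v.take word.length := by
  unfold pvWordLoop
  rw [(pvWordLoop_mem_aux word path ws out []).2 v]
  simp

theorem pvWordLoop_snd_indep (word : List Char) (path : List (Int × Int))
    (ws : List (List Char)) (out : List (List Char × List (Int × Int))) :
    (pvWordLoop word path ws out).2 = (pvWordLoop word path ws []).2 := by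
  unfold pvWordLoop
  rw [pvWordLoop_split]

theorem pvWordLoop_fst_split (word : List Char) (path : List (Int × Int))
    (ws : List (List Char)) (out : List (List Char × List (Int × Int))) :
    (pvWordLoop word path ws out).1 = out ++ (pvWordLoop word path ws []).1 := by
  unfold pvWordLoop
  rw [pvWordLoop_split]

-- Layer 2: genAllHelper is append-threaded in its accumulator
theorem pvFoldlAppendInit {ι X : Type} (g : List X → ι → List X)
    (hg : ∀ acc i, g acc i = acc ++ g [] i) (l : List ι) (a b : List X) :
    l.foldl g (a ++ b) = a ++ l.foldl g b := by
  rw [pvFoldlExtends g hg l (a ++ b), pvFoldlExtends g hg l b, List.append_assoc]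

theorem genAllHelper_append (board : List (List String)) :
    ∀ (fuel : Nat) (word : List Char) (path : List (Int × Int)) (ws : List (List Char))
      (out : List (List Char × List (Int × Int))),
    genAllHelper board fuel word path ws out = out ++ genAllHelper board fuel word path ws [] := by
  intro fuel
  induction fuel with
  | zero =>
    intro word path ws out
    rw [genAllHelper.eq_def, genAllHelper.eq_def]
    simp only [pvWordLoop_snd_indep word path ws out, pvWordLoop_fst_split word path ws out]
    by_cases h : (pvWordLoop word path ws []).2 ≠ [] <;> simp [h]
  | succ fuel ih =>
    intro word path ws out
    rw [genAllHelper.eq_def, genAllHelper.eq_def]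
    simp only [pvWordLoop_snd_indep word path ws out, pvWordLoop_fst_split word path ws out]
    by_cases h : (pvWordLoop word path ws []).2 ≠ []
    · simp only [if_pos h]
      refine pvFoldlAppendInit _ ?_ _ _ _
      intro acc row
      refine pvFoldlExtends _ ?_ _ _
      intro a c
      dsimp only
      split
      · exact ih _ _ _ _
      · simp
    · simp [h]

-- Layer 3: the semantic path predicates
def pvInb (board : List (List String)) (q : Int × Int) : Prop :=
  0 ≤ q.1 ∧ q.1 < (board.length : Int) ∧ 0 ≤ q.2 ∧ q.2 < (pvCols board : Int)

def pvNbr (a b : Int × Int) : Prop :=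
  ∃ dr ∈ ([-1, 0, 1] : List Int), ∃ dc ∈ ([-1, 0, 1] : List Int), b = (a.1 + dr, a.2 + dc)

def pvSpell (board : List (List String)) (p : List (Int × Int)) : List Char :=
  p.flatMap (fun q => pvCell board q.1 q.2)

def pvGood (board : List (List String)) (p : List (Int × Int)) : Prop :=
  p ≠ [] ∧ List.IsChain pvNbr p ∧ p.Nodup ∧ ∀ q ∈ p, pvInb board q

def pvCand (board : List (List String)) (w : List Char) (p : List (Int × Int)) : Prop :=
  pvGood board p ∧ pvSpell board p = w ∧
    ∀ k, 0 < k → k < p.length → pvSpell board (p.take k) ≠ w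

theorem pvSpell_append (board : List (List String)) (p q : List (Int × Int)) :
    pvSpell board (p ++ q) = pvSpell board p ++ pvSpell board q := by
  simp [pvSpell]

theorem pvSpell_singleton (board : List (List String)) (q : Int × Int) :
    pvSpell board [q] = pvCell board q.1 q.2 := by
  simp [pvSpell]

theorem pvSpell_prefix (board : List (List String)) {p q : List (Int × Int)}
    (h : p <+: q) : pvSpell board p <+: pvSpell board q := by
  obtain ⟨t, rfl⟩ := h
  exact ⟨pvSpell board t, (pvSpell_append board p t).symm⟩

theorem pvEncInj (C a1 b1 a2 b2 : Nat) (h1 : b1 < C) (h2 : b2 < C)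
    (h : a1 * C + b1 = a2 * C + b2) : a1 = a2 ∧ b1 = b2 := by
  rcases lt_trichotomy a1 a2 with hlt | heq | hgt
  · have : a1 * C + C ≤ a2 * C := by
      have := Nat.mul_le_mul_right C (Nat.succ_le_of_lt hlt)
      simpa [Nat.succ_mul] using this
    omega
  · constructor
    · exact heq
    · subst heq; omega
  · have : a2 * C + C ≤ a1 * C := by
      have := Nat.mul_le_mul_right C (Nat.succ_le_of_lt hgt)
      simpa [Nat.succ_mul] using this
    omega

theorem pvGood_length_le (board : List (List String)) (p : List (Int × Int))
    (h : pvGood board p) : p.length ≤ board.length * pvCols board := by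
  classical
  obtain ⟨-, -, hnd, hinb⟩ := h
  set C := pvCols board with hC
  set R := board.length with hR
  have hmapnd : (p.map (fun q => q.1.toNat * C + q.2.toNat)).Nodup := by
    refine List.Nodup.map_on ?_ hnd
    intro a ha b hb hab
    obtain ⟨ha1, ha2, ha3, ha4⟩ := hinb a ha
    obtain ⟨hb1, hb2, hb3, hb4⟩ := hinb b hb
    have h2a : a.2.toNat < C := by omega
    have h2b : b.2.toNat < C := by omega
    obtain ⟨e1, e2⟩ := pvEncInj C _ _ _ _ h2a h2b hab
    have : a.1 = b.1 := by omega
    have : a.2 = b.2 := by omega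
    exact Prod.ext ‹a.1 = b.1› ‹a.2 = b.2›
  have hsub : (p.map (fun q => q.1.toNat * C + q.2.toNat)) ⊆ List.range (R * C) := by
    intro v hv
    rw [List.mem_map] at hv
    obtain ⟨q, hq, rfl⟩ := hv
    obtain ⟨h1, h2, h3, h4⟩ := hinb q hq
    rw [List.mem_range]
    have hq1 : q.1.toNat + 1 ≤ R := by omega
    have hq2 : q.2.toNat < C := by omega
    have : (q.1.toNat + 1) * C ≤ R * C := Nat.mul_le_mul_right C hq1
    have h' : q.1.toNat * C + C ≤ R * C := by simpa [Nat.succ_mul] using this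
    omega
  have hsp : (p.map (fun q => q.1.toNat * C + q.2.toNat)).Subperm (List.range (R * C)) := by
    refine List.subperm_ext_iff.mpr (fun a ha => ?_)
    have hcount : (p.map (fun q => q.1.toNat * C + q.2.toNat)).count a = 1 :=
      List.count_eq_one_of_mem hmapnd ha
    have hpos : 0 < (List.range (R * C)).count a := List.count_pos_iff.2 (hsub ha)
    omega
  have := hsp.length_le
  simpa using this

theorem pvFoldl2_mem {ι κ X : Type} (l1 : List ι) (l2 : List κ) (g : List X → ι → κ → List X)
    (hg : ∀ acc i j, g acc i j = acc ++ g [] i j) (init : List X) (x : X) :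
    x ∈ l1.foldl (fun acc i => l2.foldl (fun acc j => g acc i j) acc) init ↔
      x ∈ init ∨ ∃ i ∈ l1, ∃ j ∈ l2, x ∈ g [] i j := by
  have houter : ∀ (acc : List X) (i : ι),
      (fun acc i => l2.foldl (fun acc j => g acc i j) acc) acc i
        = acc ++ (fun acc i => l2.foldl (fun acc j => g acc i j) acc) [] i :=
    fun acc i => pvFoldlExtends _ (fun a j => hg a i j) l2 acc
  rw [pvFoldlMem _ houter]
  refine or_congr Iff.rfl (exists_congr fun i => and_congr Iff.rfl ?_)
  rw [pvFoldlMem _ (fun a j => hg a i j)]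
  simp

-- what gen_all_helper (with empty accumulator) contains: exactly the words of ws reachable by
-- extending path, completed only at the final cell
theorem genAllHelper_mem_iff (board : List (List String)) :
    ∀ (fuel : Nat) (word : List Char) (path : List (Int × Int)) (ws : List (List Char))
      (x : List Char × List (Int × Int)),
    pvGood board path → pvSpell board path = word →
    path.length + fuel = board.length * pvCols board + 1 →
    (x ∈ genAllHelper board fuel word path ws [] ↔
      ∃ v ext, x = (v, path ++ ext) ∧ v ∈ ws ∧ pvGood board (path ++ ext) ∧
        pvSpell board (path ++ ext) = v ∧
        ∀ k, path.length ≤ k → k < path.length + ext.length →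
          pvSpell board ((path ++ ext).take k) ≠ v) := by
  intro fuel
  induction fuel with
  | zero =>
    intro word path ws x hGood hSpell hLen
    have hle := pvGood_length_le board path hGood
    omega
  | succ fuel ih =>
    intro word path ws x hGood hSpell hLen
    have hne : path ≠ [] := hGood.1
    by_cases hW : (pvWordLoop word path ws []).2 ≠ []
    · -- words still extendable: one no-prefix-match shortcut plus the nine neighbour branches
      have h9 : x ∈ genAllHelper board (fuel + 1) word path ws [] ↔
          x ∈ (pvWordLoop word path ws []).1 ∨
          ∃ r ∈ ([-1, 0, 1] : List Int), ∃ c ∈ ([-1, 0, 1] : List Int),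
            x ∈ (if (path.getLast hne).1 + r < (board.length : Int) ∧ 0 ≤ (path.getLast hne).1 + r ∧
                  (path.getLast hne).2 + c < (pvCols board : Int) ∧ 0 ≤ (path.getLast hne).2 + c ∧
                  ((path.getLast hne).1 + r, (path.getLast hne).2 + c) ∉ path then
                genAllHelper board fuel
                  (word ++ pvCell board ((path.getLast hne).1 + r) ((path.getLast hne).2 + c))
                  (path ++ [((path.getLast hne).1 + r, (path.getLast hne).2 + c)])
                  (pvWordLoop word path ws []).2 []
              else []) := by
        rw [genAllHelper.eq_def]
        simp only [if_pos hW, PySem.List.pyGetD_neg_one path ((0 : Int), (0 : Int)) hne]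
        exact pvFoldl2_mem ([-1, 0, 1] : List Int) ([-1, 0, 1] : List Int)
          (fun acc r c =>
            if (path.getLast hne).1 + r < (board.length : Int) ∧ 0 ≤ (path.getLast hne).1 + r ∧
                (path.getLast hne).2 + c < (pvCols board : Int) ∧ 0 ≤ (path.getLast hne).2 + c ∧
                ((path.getLast hne).1 + r, (path.getLast hne).2 + c) ∉ path then
              genAllHelper board fuel
                (word ++ pvCell board ((path.getLast hne).1 + r) ((path.getLast hne).2 + c))
                (path ++ [((path.getLast hne).1 + r, (path.getLast hne).2 + c)])
                (pvWordLoop word path ws []).2 acc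
            else acc)
          (by
            intro acc i j
            dsimp only
            split
            · exact genAllHelper_append board fuel _ _ _ acc
            · simp)
          _ x
      rw [h9]
      constructor
      · rintro (hx | ⟨r, hr, c, hc, hx⟩)
        · rw [pvWordLoop_fst_mem] at hx
          simp only [List.not_mem_nil, false_or] at hx
          obtain ⟨hws, rfl⟩ := hx
          refine ⟨word, [], by simp, hws, by simpa using hGood, by simpa using hSpell, ?_⟩
          intro k hk1 hk2
          simp at hk2
          omega
        · rcases Decidable.em ((path.getLast hne).1 + r < (board.length : Int) ∧
              0 ≤ (path.getLast hne).1 + r ∧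
              (path.getLast hne).2 + c < (pvCols board : Int) ∧ 0 ≤ (path.getLast hne).2 + c ∧
              ((path.getLast hne).1 + r, (path.getLast hne).2 + c) ∉ path) with hcond | hcond
          swap
          · rw [if_neg hcond] at hx
            exact absurd hx List.not_mem_nil
          rw [if_pos hcond] at hx
          obtain ⟨hc1, hc2, hc3, hc4, hc5⟩ := hcond
          have hGood' : pvGood board (path ++ [((path.getLast hne).1 + r, (path.getLast hne).2 + c)]) := by
            refine ⟨by simp, ?_, ?_, ?_⟩
            · rw [List.isChain_append]
              refine ⟨hGood.2.1, List.IsChain.singleton _, ?_⟩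
              intro a ha b hb
              rw [List.getLast?_eq_some_getLast hne, Option.mem_some_iff] at ha
              simp only [List.head?_cons, Option.mem_some_iff] at hb
              subst ha; subst hb
              exact ⟨r, hr, c, hc, rfl⟩
            · rw [List.nodup_append]
              refine ⟨hGood.2.2.1, List.nodup_singleton _, ?_⟩
              intro a ha b hb heq
              simp only [List.mem_singleton] at hb
              subst hb
              exact hc5 (heq ▸ ha)
            · intro q hq
              rcases List.mem_append.mp hq with hq | hq
              · exact hGood.2.2.2 q hq
              · simp at hq
                subst hq
                exact ⟨hc2, hc1, hc4, hc3⟩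
          have hSpell' : pvSpell board (path ++ [((path.getLast hne).1 + r, (path.getLast hne).2 + c)]) =
              word ++ pvCell board ((path.getLast hne).1 + r) ((path.getLast hne).2 + c) := by
            rw [pvSpell_append, pvSpell_singleton, hSpell]
          have hLen' : (path ++ [((path.getLast hne).1 + r, (path.getLast hne).2 + c)]).length + fuel =
              board.length * pvCols board + 1 := by
            simp only [List.length_append, List.length_cons, List.length_nil]
            omega
          obtain ⟨v, ext', hxe, hvmem, hGoodE, hSpellE, hks⟩ := (ih _ _ _ x hGood' hSpell' hLen').1 hx
          rw [pvWordLoop_snd_mem] at hvmem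
          obtain ⟨hvws, hvne, hvtake⟩ := hvmem
          have hassoc : (path ++ [((path.getLast hne).1 + r, (path.getLast hne).2 + c)]) ++ ext' =
              path ++ ((path.getLast hne).1 + r, (path.getLast hne).2 + c) :: ext' := by simp
          refine ⟨v, ((path.getLast hne).1 + r, (path.getLast hne).2 + c) :: ext',
            by rw [← hassoc]; exact hxe, hvws, by rw [← hassoc]; exact hGoodE,
            by rw [← hassoc]; exact hSpellE, ?_⟩
          intro k hk1 hk2
          rcases eq_or_lt_of_le hk1 with hkp | hkp
          · rw [← hkp, List.take_left, hSpell]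
            exact hvne
          · have hk1' : (path ++ [((path.getLast hne).1 + r, (path.getLast hne).2 + c)]).length ≤ k := by
              simp only [List.length_append, List.length_cons, List.length_nil]
              omega
            have hk2' : k < (path ++ [((path.getLast hne).1 + r, (path.getLast hne).2 + c)]).length + ext'.length := by
              simp only [List.length_append, List.length_cons, List.length_nil] at hk2 ⊢
              omega
            have := hks k hk1' hk2'
            rw [hassoc] at this
            exact this
      · rintro ⟨v, ext, hxe, hvws, hGoodE, hSpellE, hks⟩
        cases ext with
        | nil =>
          left
          rw [pvWordLoop_fst_mem]
          simp only [List.not_mem_nil, false_or]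
          have hveq : v = word := by
            rw [← hSpell]
            rw [List.append_nil] at hSpellE
            exact hSpellE.symm
          subst hveq
          rw [List.append_nil] at hxe
          exact ⟨hvws, hxe⟩
        | cons e ext' =>
          right
          have hassoc : (path ++ [e]) ++ ext' = path ++ e :: ext' := by simp
          have hchain := hGoodE.2.1
          have hjunction : pvNbr (path.getLast hne) e := by
            rcases List.isChain_append.mp hchain with ⟨-, -, hj⟩
            exact hj _ (by rw [List.getLast?_eq_some_getLast hne]; rfl) e rfl
          obtain ⟨dr, hdr, dc, hdc, hlocEq⟩ := hjunction
          refine ⟨dr, hdr, dc, hdc, ?_⟩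
          have hinb_e : pvInb board e := hGoodE.2.2.2 e (by simp)
          have hnotin : e ∉ path := by
            have hdisj := List.disjoint_of_nodup_append hGoodE.2.2.1
            exact fun hmem => hdisj hmem (by simp)
          have hcond : (path.getLast hne).1 + dr < (board.length : Int) ∧
              0 ≤ (path.getLast hne).1 + dr ∧
              (path.getLast hne).2 + dc < (pvCols board : Int) ∧ 0 ≤ (path.getLast hne).2 + dc ∧
              ((path.getLast hne).1 + dr, (path.getLast hne).2 + dc) ∉ path := by
            rw [hlocEq] at hinb_e hnotin
            obtain ⟨h1, h2, h3, h4⟩ := hinb_e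
            exact ⟨h2, h1, h4, h3, hnotin⟩
          rw [if_pos hcond]
          have hGood' : pvGood board (path ++ [e]) := by
            refine ⟨by simp, ?_, ?_, ?_⟩
            · have := hchain
              rw [← hassoc, List.isChain_append] at this
              exact this.1
            · have := hGoodE.2.2.1
              rw [← hassoc] at this
              exact List.Sublist.nodup (List.sublist_append_left _ _) this
            · intro q hq
              exact hGoodE.2.2.2 q (by rw [← hassoc]; exact List.mem_append_left _ hq)
          have hSpell' : pvSpell board (path ++ [e]) = word ++ pvCell board e.1 e.2 := by
            rw [pvSpell_append, pvSpell_singleton, hSpell]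
          have hLen' : (path ++ [e]).length + fuel = board.length * pvCols board + 1 := by
            simp only [List.length_append, List.length_cons, List.length_nil]
            omega
          have hwordne : word ≠ v := by
            have hk := hks path.length le_rfl (by simp)
            rw [List.take_left, hSpell] at hk
            exact hk
          have hwordtake : word = v.take word.length := by
            have hpre : pvSpell board path <+: pvSpell board (path ++ e :: ext') :=
              pvSpell_prefix board (List.prefix_append _ _)
            rw [hSpell, hSpellE] at hpre
            exact List.prefix_iff_eq_take.mp hpre
          have hx' : x ∈ genAllHelper board fuel (word ++ pvCell board e.1 e.2) (path ++ [e])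
              (pvWordLoop word path ws []).2 [] := by
            apply (ih _ _ _ x hGood' hSpell' hLen').2
            refine ⟨v, ext', by rw [hassoc]; exact hxe,
              (pvWordLoop_snd_mem word path ws [] v).2 ⟨hvws, hwordne, hwordtake⟩,
              by rw [hassoc]; exact hGoodE, by rw [hassoc]; exact hSpellE, ?_⟩
            intro k hk1 hk2
            rw [hassoc]
            apply hks k
            · simp only [List.length_append, List.length_cons, List.length_nil] at hk1
              omega
            · simp only [List.length_append, List.length_cons, List.length_nil] at hk2 ⊢
              omega
          rw [show ((path.getLast hne).1 + dr, (path.getLast hne).2 + dc) = e from hlocEq.symm,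
            show pvCell board ((path.getLast hne).1 + dr) ((path.getLast hne).2 + dc) = pvCell board e.1 e.2 from by rw [hlocEq]]
          exact hx'
      
    · -- no word has the current word as a strict prefix: only the exact match can be added
      have hfst : x ∈ genAllHelper board (fuel + 1) word path ws [] ↔
          x ∈ (pvWordLoop word path ws []).1 := by
        rw [genAllHelper.eq_def]
        simp only [if_neg hW]
      rw [hfst, pvWordLoop_fst_mem]
      simp only [List.not_mem_nil, false_or]
      push Not at hW
      constructor
      · rintro ⟨hws, rfl⟩
        refine ⟨word, [], by simp, hws, by simpa using hGood, by simpa using hSpell, ?_⟩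
        intro k hk1 hk2
        simp at hk2
        omega
      · rintro ⟨v, ext, rfl, hv, hGoodE, hSpellE, hks⟩
        cases ext with
        | nil =>
          have hveq : v = word := by
            rw [← hSpell]
            rw [List.append_nil] at hSpellE
            exact hSpellE.symm
          subst hveq
          exact ⟨hv, by simp⟩
        | cons e ext' =>
          exfalso
          have hpre : pvSpell board path <+: pvSpell board (path ++ e :: ext') :=
            pvSpell_prefix board (List.prefix_append _ _)
          rw [hSpell, hSpellE] at hpre
          have htake : word = v.take word.length := List.prefix_iff_eq_take.mp hpre
          have hneq : word ≠ v := by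
            have hk := hks path.length le_rfl (by simp)
            rw [List.take_left] at hk
            rw [hSpell] at hk
            exact hk
          have hmem : v ∈ (pvWordLoop word path ws []).2 :=
            (pvWordLoop_snd_mem word path ws [] v).2 ⟨hv, hneq, htake⟩
          rw [hW] at hmem
          exact List.not_mem_nil hmem

-- Layer 4: gen_all produces exactly the candidate pairs
theorem genAll_mem_iff (board : List (List String)) (words : List String)
    (x : List Char × List (Int × Int)) :
    x ∈ genAll board words ↔
      x.1 ∈ words.map String.toList ∧ pvCand board x.1 x.2 := by
  unfold genAll
  rw [pvFoldl2_mem (PySem.List.pyRange 0 (board.length : Int) 1)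
      (PySem.List.pyRange 0 (pvCols board : Int) 1)
      (fun all r c => genAllHelper board (board.length * pvCols board) (pvCell board r c)
        [(r, c)] (words.map String.toList) all)
      (fun acc i j => genAllHelper_append board _ _ _ _ acc) [] x]
  simp only [List.not_mem_nil, false_or]
  constructor
  · rintro ⟨r, hr, c, hc, hx⟩
    rw [PySem.List.mem_pyRange_one] at hr hc
    have hGood1 : pvGood board [(r, c)] :=
      ⟨by simp, List.IsChain.singleton _, List.nodup_singleton _, by
        intro q hq; simp at hq; subst hq; exact ⟨hr.1, hr.2, hc.1, hc.2⟩⟩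
    obtain ⟨v, ext, hxe, hv, hGoodE, hSpellE, hks⟩ :=
      (genAllHelper_mem_iff board (board.length * pvCols board) (pvCell board r c) [(r, c)]
        (words.map String.toList) x hGood1 (pvSpell_singleton board (r, c))
        (by simp only [List.length_cons, List.length_nil]; omega)).1 hx
    subst hxe
    refine ⟨hv, hGoodE, hSpellE, ?_⟩
    intro k hk1 hk2
    refine hks k (by simpa using hk1) ?_
    simp only [List.length_append, List.length_cons, List.length_nil] at hk2 ⊢
    omega
  · rintro ⟨hv, hGoodC, hSpellC, hks⟩
    obtain ⟨q, ext, hq⟩ : ∃ q ext, x.2 = q :: ext := by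
      cases hx2 : x.2 with
      | nil => exact absurd hx2 hGoodC.1
      | cons q ext => exact ⟨q, ext, rfl⟩
    have hinb : pvInb board q := hGoodC.2.2.2 q (by rw [hq]; simp)
    refine ⟨q.1, ?_, q.2, ?_, ?_⟩
    · rw [PySem.List.mem_pyRange_one]; exact ⟨hinb.1, hinb.2.1⟩
    · rw [PySem.List.mem_pyRange_one]; exact ⟨hinb.2.2.1, hinb.2.2.2⟩
    have hGood1 : pvGood board [(q.1, q.2)] :=
      ⟨by simp, List.IsChain.singleton _, List.nodup_singleton _, by
        intro u hu; simp at hu; subst hu; exact hinb⟩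
    apply (genAllHelper_mem_iff board (board.length * pvCols board) (pvCell board q.1 q.2)
      [(q.1, q.2)] (words.map String.toList) x hGood1 (pvSpell_singleton board (q.1, q.2))
      (by simp only [List.length_cons, List.length_nil]; omega)).2
    have heta : [(q.1, q.2)] ++ ext = x.2 := by rw [hq]; simp
    refine ⟨x.1, ext, ?_, hv, ?_, ?_, ?_⟩
    · rw [heta]
    · rw [heta]; exact hGoodC
    · rw [heta]; exact hSpellC
    · intro k hk1 hk2
      rw [heta]
      refine hks k (by simpa using hk1) ?_
      rw [hq]
      simp only [List.length_append, List.length_cons, List.length_nil] at hk2 ⊢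
      omega

-- Layer 5: the selection order (longest path, ties by smallest flattened key)
theorem pvPathKey_inj : ∀ {p q : List (Int × Int)}, pvPathKey p = pvPathKey q → p = q := by
  intro p
  induction p with
  | nil =>
    intro q h
    cases q with
    | nil => rfl
    | cons b t => simp [pvPathKey] at h
  | cons a s ih =>
    intro q h
    cases q with
    | nil => simp [pvPathKey] at h
    | cons b t =>
      simp only [pvPathKey, List.flatMap_cons, List.cons_append, List.nil_append,
        List.cons.injEq] at h
      obtain ⟨h1, h2, h3⟩ := h
      rw [ih h3, Prod.ext h1 h2]

def pvBetter (p q : List (Int × Int)) : Prop :=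
  q.length < p.length ∨ (p.length = q.length ∧ pvPathKey p < pvPathKey q)

theorem pvBetter_irrefl (p : List (Int × Int)) : ¬ pvBetter p p := by
  simp [pvBetter]

theorem pvBetter_trans {p q r : List (Int × Int)} (h1 : pvBetter p q) (h2 : pvBetter q r) :
    pvBetter p r := by
  rcases h1 with h1 | ⟨h1a, h1b⟩ <;> rcases h2 with h2 | ⟨h2a, h2b⟩
  · exact Or.inl (by omega)
  · exact Or.inl (by omega)
  · exact Or.inl (by omega)
  · exact Or.inr ⟨by omega, lt_trans h1b h2b⟩

theorem pvBetter_total {p q : List (Int × Int)} (h : p ≠ q) : pvBetter p q ∨ pvBetter q p := by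
  rcases lt_trichotomy p.length q.length with hl | hl | hl
  · exact Or.inr (Or.inl hl)
  · rcases lt_trichotomy (pvPathKey p) (pvPathKey q) with hk | hk | hk
    · exact Or.inl (Or.inr ⟨hl, hk⟩)
    · exact absurd (pvPathKey_inj hk) h
    · exact Or.inr (Or.inr ⟨hl.symm, hk⟩)
  · exact Or.inl (Or.inl hl)

def pvOBetter : Option (List (Int × Int)) → Option (List (Int × Int)) → Prop
  | some _, none => True
  | some p, some q => pvBetter p q
  | none, _ => False

def pvOGe (x y : Option (List (Int × Int))) : Prop := x = y ∨ pvOBetter x y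

theorem pvOGe_refl (x : Option (List (Int × Int))) : pvOGe x x := Or.inl rfl

theorem pvOGe_trans {x y z : Option (List (Int × Int))} (h1 : pvOGe x y) (h2 : pvOGe y z) :
    pvOGe x z := by
  rcases h1 with rfl | h1
  · exact h2
  rcases h2 with rfl | h2
  · exact Or.inr h1
  right
  match x, y, z, h1, h2 with
  | some p, none, z, h1, h2 => exact absurd h2 (by simp [pvOBetter])
  | some p, some q, none, h1, h2 => trivial
  | some p, some q, some r, h1, h2 => exact pvBetter_trans h1 h2

-- res is the best of {b} ∪ S (b an optional previous best)
def pvBestOf (S : List (Int × Int) → Prop) (b res : Option (List (Int × Int))) : Prop :=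
  (res = b ∨ ∃ p, S p ∧ res = some p) ∧ (∀ p, S p → pvOGe res (some p)) ∧ pvOGe res b

theorem pvBestOf_iff {S S' : List (Int × Int) → Prop} (h : ∀ p, S p ↔ S' p)
    {b res : Option (List (Int × Int))} (hb : pvBestOf S b res) : pvBestOf S' b res := by
  obtain ⟨h1, h2, h3⟩ := hb
  refine ⟨?_, fun p hp => h2 p ((h p).mpr hp), h3⟩
  rcases h1 with h1 | ⟨p, hp, hres⟩
  · exact Or.inl h1
  · exact Or.inr ⟨p, (h p).mp hp, hres⟩

theorem pvBestOf_empty (b : Option (List (Int × Int))) :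
    pvBestOf (fun _ => False) b b := ⟨Or.inl rfl, fun p hp => hp.elim, pvOGe_refl b⟩

theorem pvBestOf_merge {S1 S2 : List (Int × Int) → Prop} {b m1 m2 : Option (List (Int × Int))}
    (h1 : pvBestOf S1 b m1) (h2 : pvBestOf S2 m1 m2) :
    pvBestOf (fun p => S1 p ∨ S2 p) b m2 := by
  obtain ⟨h1a, h1b, h1c⟩ := h1
  obtain ⟨h2a, h2b, h2c⟩ := h2
  refine ⟨?_, ?_, pvOGe_trans h2c h1c⟩
  · rcases h2a with rfl | ⟨p, hp, hres⟩
    · rcases h1a with h | ⟨p, hp, hres⟩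
      · exact Or.inl h
      · exact Or.inr ⟨p, Or.inl hp, hres⟩
    · exact Or.inr ⟨p, Or.inr hp, hres⟩
  · rintro p (hp | hp)
    · exact pvOGe_trans h2c (h1b p hp)
    · exact h2b p hp

theorem pvBestOf_foldl {ι : Type} (l : List ι) (T : ι → List (Int × Int) → Prop)
    (g : Option (List (Int × Int)) → ι → Option (List (Int × Int)))
    (hg : ∀ acc i, i ∈ l → pvBestOf (T i) acc (g acc i)) :
    ∀ b, pvBestOf (fun p => ∃ i ∈ l, T i p) b (l.foldl g b) := by
  induction l with
  | nil =>
    intro b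
    simpa using pvBestOf_empty b
  | cons i t ih =>
    intro b
    rw [List.foldl_cons]
    have h1 := hg b i (by simp)
    have h2 := ih (fun a j hj => hg a j (by simp [hj])) (g b i)
    refine pvBestOf_iff ?_ (pvBestOf_merge h1 h2)
    intro p
    constructor
    · rintro (hp | ⟨j, hj, hp⟩)
      · exact ⟨i, by simp, hp⟩
      · exact ⟨j, by simp [hj], hp⟩
    · rintro ⟨j, hj, hp⟩
      rcases List.mem_cons.mp hj with rfl | hj
      · exact Or.inl hp
      · exact Or.inr ⟨j, hj, hp⟩

-- A-side maximum notion (no previous best) and agreement of the two notions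
def pvIsMax (S : List (Int × Int) → Prop) (r : List (Int × Int)) : Prop :=
  S r ∧ ∀ p, S p → ¬ pvBetter p r

theorem pvBestOf_isMax_eq {S : List (Int × Int) → Prop} {res : Option (List (Int × Int))}
    {r : List (Int × Int)} (h1 : pvBestOf S none res) (h2 : pvIsMax S r) : res = some r := by
  obtain ⟨h1a, h1b, -⟩ := h1
  rcases h1a with rfl | ⟨p, hp, hres⟩
  · exact absurd ((by
      rcases h1b r h2.1 with h | h
      · exact absurd h.symm (by simp)
      · exact absurd h (by simp [pvOBetter])) : False) id
  · subst hres
    rcases h1b r h2.1 with h | h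
    · exact h.symm ▸ rfl
    · simp only [pvOBetter] at h
      rcases eq_or_ne p r with rfl | hne
      · rfl
      · exact absurd h (h2.2 p hp)

theorem pvBestOf_some_mem {S : List (Int × Int) → Prop} {res : Option (List (Int × Int))}
    {b : List (Int × Int)} (h : pvBestOf S none res) (hres : res = some b) : S b := by
  rcases h.1 with h1 | ⟨p, hp, hq⟩
  · rw [h1] at hres; exact absurd hres (by simp)
  · rw [hq] at hres
    injection hres with hh
    exact hh ▸ hp

-- Layer 6: the per-word DFS of B computes the best candidate extension of path
theorem pvTake_ne_self {w : List Char} {i : Nat} (h : i < w.length) : w.take i ≠ w := by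
  intro he
  have := congrArg List.length he
  simp [List.length_take] at this
  omega

theorem dfsB_spec (board : List (List String)) :
    ∀ (fuel : Nat) (w : List Char) (r c : Int) (i : Nat) (path : List (Int × Int))
      (best : Option (List (Int × Int))),
    pvGood board path → path.getLast? = some (r, c) → pvSpell board path = w.take i →
    i ≤ w.length →
    (∀ k, 0 < k → k < path.length → pvSpell board (path.take k) ≠ w) →
    path.length + fuel = board.length * pvCols board + 1 →
    pvBestOf (fun p => path <+: p ∧ pvCand board w p) best (dfsB board w fuel r c i path best) := by
  intro fuel
  induction fuel with
  | zero =>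
    intro w r c i path best hGood hLast hSpell hile hks hLen
    have hle := pvGood_length_le board path hGood
    omega
  | succ fuel ih =>
    intro w r c i path best hGood hLast hSpell hile hks hLen
    rw [dfsB.eq_def]
    by_cases hi : i = w.length
    · simp only [if_pos hi]
      have hCandPath : pvCand board w path := by
        refine ⟨hGood, by rw [hSpell, hi, List.take_length], hks⟩
      have hSiff : ∀ p, p = path ↔ (path <+: p ∧ pvCand board w p) := by
        intro p
        constructor
        · rintro rfl
          exact ⟨List.prefix_rfl, hCandPath⟩
        · rintro ⟨⟨ext, rfl⟩, hCand⟩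
          cases ext with
          | nil => simp
          | cons e ext' =>
            exfalso
            have hlenpos : 0 < path.length := List.length_pos_of_ne_nil hGood.1
            have := hCand.2.2 path.length hlenpos (by simp)
            rw [List.take_left, hSpell, hi, List.take_length] at this
            exact this rfl
      cases best with
      | none =>
        dsimp only
        exact pvBestOf_iff hSiff ⟨Or.inr ⟨path, rfl, rfl⟩,
          fun p hp => by rw [hp]; exact pvOGe_refl _, Or.inr trivial⟩
      | some b =>
        dsimp only
        split
        · rename_i hcond
          exact pvBestOf_iff hSiff ⟨Or.inr ⟨path, rfl, rfl⟩,
            fun p hp => by rw [hp]; exact pvOGe_refl _, Or.inr hcond⟩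
        · rename_i hcond
          have hdom : pvOGe (some b) (some path) := by
            rcases eq_or_ne b path with rfl | hne
            · exact pvOGe_refl _
            · rcases pvBetter_total hne with h | h
              · exact Or.inr h
              · exact absurd h hcond
          exact pvBestOf_iff hSiff ⟨Or.inl rfl,
            fun p hp => by rw [hp]; exact hdom, pvOGe_refl _⟩
    · simp only [if_neg hi]
      have hilt : i < w.length := lt_of_le_of_ne hile hi
      have hne : path ≠ [] := hGood.1
      refine pvBestOf_iff ?hiff (pvBestOf_foldl ([-1, 0, 1] : List Int)
        (fun dr p => ∃ dc ∈ ([-1, 0, 1] : List Int),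
          ((0 ≤ r + dr ∧ r + dr < (board.length : Int) ∧ 0 ≤ c + dc ∧ c + dc < (pvCols board : Int) ∧
              (r + dr, c + dc) ∉ path) ∧
            (w.drop i).take (pvCell board (r + dr) (c + dc)).length = pvCell board (r + dr) (c + dc)) ∧
          (path ++ [(r + dr, c + dc)] <+: p ∧ pvCand board w p))
        _ ?hg best)
      -- the union of the nine branch sets is the full extension set
      case hiff =>
        intro p
        constructor
        · rintro ⟨dr, -, dc, -, -, hpre, hCand⟩
          exact ⟨(List.prefix_append _ _).trans hpre, hCand⟩
        · rintro ⟨⟨ext, rfl⟩, hCand⟩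
          cases ext with
          | nil =>
            exfalso
            have : pvSpell board path = w := by simpa using hCand.2.1
            rw [hSpell] at this
            exact pvTake_ne_self hilt this
          | cons e ext' =>
            have hassoc : (path ++ [e]) ++ ext' = path ++ e :: ext' := by simp
            have hjunction : pvNbr (path.getLast hne) e := by
              rcases List.isChain_append.mp hCand.1.2.1 with ⟨-, -, hj⟩
              exact hj _ (by rw [List.getLast?_eq_some_getLast hne]; rfl) e rfl
            obtain ⟨dr, hdr, dc, hdc, hlocEq⟩ := hjunction
            have hrc : path.getLast hne = (r, c) := by
              have := hLast
              rw [List.getLast?_eq_some_getLast hne, Option.some_inj] at this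
              exact this
            rw [hrc] at hlocEq
            have hinb_e : pvInb board e := hCand.1.2.2.2 e (by simp)
            have hnotin : e ∉ path := by
              have hdisj := List.disjoint_of_nodup_append hCand.1.2.2.1
              exact fun hmem => hdisj hmem (by simp)
            rw [hlocEq] at hinb_e hnotin
            have hcell : (w.drop i).take (pvCell board (r + dr) (c + dc)).length =
                pvCell board (r + dr) (c + dc) := by
              have hpre : pvSpell board (path ++ [e]) <+: pvSpell board (path ++ e :: ext') := by
                rw [← hassoc]
                exact pvSpell_prefix board (List.prefix_append _ _)
              rw [hCand.2.1, pvSpell_append, pvSpell_singleton, hSpell, hlocEq] at hpre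
              obtain ⟨t, ht⟩ := hpre
              rw [List.append_assoc] at ht
              have hti : (w.take i).length = i := by
                simp only [List.length_take]
                omega
              have hdl : (w.take i ++ (pvCell board (r + dr) (c + dc) ++ t)).drop i =
                  pvCell board (r + dr) (c + dc) ++ t := List.drop_left' hti
              rw [ht] at hdl
              exact (List.prefix_iff_eq_take.mp ⟨t, hdl.symm ▸ rfl⟩).symm
            refine ⟨dr, hdr, dc, hdc,
              ⟨⟨hinb_e.1, hinb_e.2.1, hinb_e.2.2.1, hinb_e.2.2.2, hnotin⟩, hcell⟩, ?_, hCand⟩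
            rw [← hlocEq]
            exact ⟨ext', hassoc⟩
      -- hg: each branch computes the best of its branch set
      case hg =>
        intro acc dr _
        refine pvBestOf_foldl ([-1, 0, 1] : List Int)
          (fun dc p =>
            ((0 ≤ r + dr ∧ r + dr < (board.length : Int) ∧ 0 ≤ c + dc ∧ c + dc < (pvCols board : Int) ∧
                (r + dr, c + dc) ∉ path) ∧
              (w.drop i).take (pvCell board (r + dr) (c + dc)).length = pvCell board (r + dr) (c + dc)) ∧
            (path ++ [(r + dr, c + dc)] <+: p ∧ pvCand board w p))
          _ ?_ acc
        intro acc2 dc hdc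
        dsimp only
        split
        · rename_i hcond
          split
          · rename_i hcell
            -- recursive branch: apply the induction hypothesis
            have hGood' : pvGood board (path ++ [(r + dr, c + dc)]) := by
              refine ⟨by simp, ?_, ?_, ?_⟩
              · rw [List.isChain_append]
                refine ⟨hGood.2.1, List.IsChain.singleton _, ?_⟩
                intro a ha b hb
                rw [hLast, Option.mem_some_iff] at ha
                simp only [List.head?_cons, Option.mem_some_iff] at hb
                subst ha; subst hb
                exact ⟨dr, by assumption, dc, hdc, rfl⟩
              · rw [List.nodup_append]
                refine ⟨hGood.2.2.1, List.nodup_singleton _, ?_⟩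
                intro a ha b hb heq
                simp only [List.mem_singleton] at hb
                subst hb
                exact hcond.2.2.2.2 (heq ▸ ha)
              · intro q hq
                rcases List.mem_append.mp hq with hq | hq
                · exact hGood.2.2.2 q hq
                · simp at hq
                  subst hq
                  exact ⟨hcond.1, hcond.2.1, hcond.2.2.1, hcond.2.2.2.1⟩
            have hcl : (pvCell board (r + dr) (c + dc)).length ≤ w.length - i := by
              have := congrArg List.length hcell
              simp only [List.length_take, List.length_drop] at this
              omega
            have hSpell' : pvSpell board (path ++ [(r + dr, c + dc)]) =
                w.take (i + (pvCell board (r + dr) (c + dc)).length) := by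
              rw [pvSpell_append, pvSpell_singleton, hSpell, List.take_add, hcell]
            have hks' : ∀ k, 0 < k → k < (path ++ [(r + dr, c + dc)]).length →
                pvSpell board ((path ++ [(r + dr, c + dc)]).take k) ≠ w := by
              intro k hk1 hk2
              simp only [List.length_append, List.length_cons, List.length_nil] at hk2
              rcases lt_or_eq_of_le (Nat.lt_succ_iff.mp hk2) with hk | hk
              · rw [List.take_append_of_le_length (by omega)]
                exact hks k hk1 hk
              · subst hk
                rw [List.take_left, hSpell]
                exact pvTake_ne_self hilt
            have := ih w (r + dr) (c + dc) (i + (pvCell board (r + dr) (c + dc)).length)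
              (path ++ [(r + dr, c + dc)]) acc2 hGood' List.getLast?_concat
              hSpell' (by omega) hks'
              (by simp only [List.length_append, List.length_cons, List.length_nil]; omega)
            refine pvBestOf_iff ?_ this
            intro p
            constructor
            · rintro ⟨hpre, hCand⟩
              exact ⟨⟨hcond, hcell⟩, hpre, hCand⟩
            · rintro ⟨-, hpre, hCand⟩
              exact ⟨hpre, hCand⟩
          · rename_i hcell
            refine pvBestOf_iff ?_ (pvBestOf_empty acc2)
            intro p
            refine ⟨fun h => h.elim, ?_⟩
            rintro ⟨⟨-, hc⟩, -⟩
            exact absurd hc hcell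
        · rename_i hcond
          refine pvBestOf_iff ?_ (pvBestOf_empty acc2)
          intro p
          refine ⟨fun h => h.elim, ?_⟩
          rintro ⟨⟨hc, -⟩, -⟩
          exact absurd hc hcond

-- Layer 7: B's inner double loop over all start cells, per word
def pvBBest (board : List (List String)) (w : String) : Option (List (Int × Int)) :=
  (PySem.List.pyRange 0 (board.length : Int) 1).foldl (fun best r =>
    (PySem.List.pyRange 0 (pvCols board : Int) 1).foldl (fun best c =>
      let cell := pvCell board r c
      if w.toList.take cell.length = cell then
        dfsB board w.toList (board.length * pvCols board) r c cell.length [(r, c)] best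
      else best) best) none

theorem max_score_paths_alt_eq (board : List (List String)) (words : List String) :
    max_score_paths_alt board words =
      (PySem.List.sorted (PySem.Set.ofList words) (fun x => x)).foldl
        (fun result w => match pvBBest board w with
          | none => result
          | some b => result ++ [b]) [] := rfl

theorem pvBBest_spec (board : List (List String)) (w : String) :
    pvBestOf (fun p => pvCand board w.toList p) none (pvBBest board w) := by
  unfold pvBBest
  refine pvBestOf_iff ?hiff (pvBestOf_foldl (PySem.List.pyRange 0 (board.length : Int) 1)
    (fun r p => ∃ c ∈ PySem.List.pyRange 0 (pvCols board : Int) 1,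
      (w.toList.take (pvCell board r c).length = pvCell board r c) ∧
      ([(r, c)] <+: p ∧ pvCand board w.toList p))
    _ ?hg none)
  case hg =>
    intro acc r hr
    refine pvBestOf_foldl (PySem.List.pyRange 0 (pvCols board : Int) 1)
      (fun c p =>
        (w.toList.take (pvCell board r c).length = pvCell board r c) ∧
        ([(r, c)] <+: p ∧ pvCand board w.toList p))
      _ ?_ acc
    intro acc2 c hc
    dsimp only
    split
    · rename_i hcell
      rw [PySem.List.mem_pyRange_one] at hr hc
      have hGood1 : pvGood board [(r, c)] :=
        ⟨by simp, List.IsChain.singleton _, List.nodup_singleton _, by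
          intro q hq; simp at hq; subst hq; exact ⟨hr.1, hr.2, hc.1, hc.2⟩⟩
      have hcl : (pvCell board r c).length ≤ w.toList.length := by
        have := congrArg List.length hcell
        simp only [List.length_take] at this
        omega
      have := dfsB_spec board (board.length * pvCols board) w.toList r c
        (pvCell board r c).length [(r, c)] acc2 hGood1 (by simp)
        (by rw [pvSpell_singleton]; exact hcell.symm) hcl
        (by intro k hk1 hk2; simp at hk2; omega)
        (by simp only [List.length_cons, List.length_nil]; omega)
      refine pvBestOf_iff ?_ this
      intro p
      exact ⟨fun h => ⟨hcell, h.1, h.2⟩, fun h => ⟨h.2.1, h.2.2⟩⟩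
    · rename_i hcell
      refine pvBestOf_iff ?_ (pvBestOf_empty acc2)
      intro p
      refine ⟨fun h => h.elim, ?_⟩
      rintro ⟨hc1, -⟩
      exact absurd hc1 hcell
  case hiff =>
    intro p
    constructor
    · rintro ⟨r, -, c, -, -, -, hCand⟩
      exact hCand
    · intro hCand
      obtain ⟨q, ext, hq⟩ : ∃ q ext, p = q :: ext := by
        cases hp : p with
        | nil => exact absurd hp hCand.1.1
        | cons q ext => exact ⟨q, ext, rfl⟩
      have hinb : pvInb board q := hCand.1.2.2.2 q (by rw [hq]; simp)
      have hcellq : w.toList.take (pvCell board q.1 q.2).length = pvCell board q.1 q.2 := by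
        have hpre : pvSpell board [q] <+: pvSpell board p := by
          rw [hq]
          exact pvSpell_prefix board ⟨ext, by simp⟩
        rw [pvSpell_singleton, hCand.2.1] at hpre
        exact (List.prefix_iff_eq_take.mp hpre).symm
      refine ⟨q.1, ?_, q.2, ?_, hcellq, ⟨ext, ?_⟩, hCand⟩
      · rw [PySem.List.mem_pyRange_one]; exact ⟨hinb.1, hinb.2.1⟩
      · rw [PySem.List.mem_pyRange_one]; exact ⟨hinb.2.2.1, hinb.2.2.2⟩
      · rw [hq]; simp

-- Layer 8: A's scan of the sorted pair list
theorem scanInner_group (cw : List Char) :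
    ∀ (g : List (List Char × List (Int × Int))) (rest : List (List Char × List (Int × Int)))
      (pta : List (Int × Int)),
    (∀ x ∈ g, x.1 = cw) → (∀ y, rest.head? = some y → y.1 ≠ cw) →
    scanInner cw pta (g ++ rest) =
      (g.foldl (fun b x => if x.2.length > b.length then x.2 else b) pta, rest) := by
  intro g
  induction g with
  | nil =>
    intro rest pta hg hrest
    cases rest with
    | nil => simp [scanInner]
    | cons y t =>
      have hy : y.1 ≠ cw := hrest y rfl
      simp [scanInner, hy]
  | cons x gt ih =>
    intro rest pta hg hrest
    have hx : x.1 = cw := hg x (by simp)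
    simp only [List.cons_append, scanInner, if_pos hx, List.foldl_cons]
    exact ih rest _ (fun y hy => hg y (by simp [hy])) hrest

theorem foldBest_isMax :
    ∀ (ps : List (List (Int × Int))) (pta : List (Int × Int)),
    List.Pairwise (fun a b => pvPathKey a ≤ pvPathKey b) (pta :: ps) →
    pvIsMax (fun p => p = pta ∨ p ∈ ps)
      (ps.foldl (fun b q => if q.length > b.length then q else b) pta) := by
  intro ps
  induction ps with
  | nil =>
    intro pta h
    refine ⟨Or.inl rfl, ?_⟩
    intro p hp
    rcases hp with hpe | hp
    · rw [hpe]; exact pvBetter_irrefl pta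
    · simp at hp
  | cons q t ih =>
    intro pta h
    rw [List.foldl_cons]
    have hptaq : pvPathKey pta ≤ pvPathKey q := (List.pairwise_cons.mp h).1 q (by simp)
    by_cases hq : q.length > pta.length
    · rw [if_pos hq]
      have hpw : List.Pairwise (fun a b => pvPathKey a ≤ pvPathKey b) (q :: t) :=
        h.sublist (List.sublist_cons_self pta (q :: t))
      obtain ⟨hmem, hdom⟩ := ih q hpw
      set rr := t.foldl (fun b p => if p.length > b.length then p else b) q with hrr
      have hqr : ¬ pvBetter q rr := hdom q (Or.inl rfl)
      have hrlen : q.length ≤ rr.length := by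
        by_contra hc
        exact hqr (Or.inl (by omega))
      refine ⟨?_, ?_⟩
      · rcases hmem with h1 | h1
        · exact Or.inr (by simp [h1])
        · exact Or.inr (by simp [h1])
      · intro p hp
        rcases hp with hpe | hp
        · rw [hpe]
          intro hbet
          rcases hbet with hbet | ⟨hlen, -⟩
          · omega
          · omega
        · rcases List.mem_cons.mp hp with hpe | hp'
          · rw [hpe]; exact hqr
          · exact hdom p (Or.inr hp')
    · rw [if_neg hq]
      have hpw : List.Pairwise (fun a b => pvPathKey a ≤ pvPathKey b) (pta :: t) :=
        h.sublist (List.Sublist.cons₂ pta (List.sublist_cons_self q t))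
      obtain ⟨hmem, hdom⟩ := ih pta hpw
      set rr := t.foldl (fun b p => if p.length > b.length then p else b) pta with hrr
      have hnb : ¬ pvBetter pta rr := hdom pta (Or.inl rfl)
      have hrlen : pta.length ≤ rr.length := by
        by_contra hc
        exact hnb (Or.inl (by omega))
      refine ⟨?_, ?_⟩
      · rcases hmem with h1 | h1
        · exact Or.inl h1
        · exact Or.inr (by simp [h1])
      · intro p hp
        rcases hp with hpe | hp
        · rw [hpe]; exact hnb
        · rcases List.mem_cons.mp hp with hpe | hp'
          · rw [hpe]
            intro hbet
            rcases hbet with hbet | ⟨hlen, hkey⟩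
            · omega
            · have hall : pta.length = rr.length := by omega
              have hkr : ¬ pvPathKey pta < pvPathKey rr := fun hc => hnb (Or.inr ⟨hall, hc⟩)
              have hlt : pvPathKey q < pvPathKey pta :=
                lt_of_lt_of_le hkey (le_of_not_gt (by simpa using hkr))
              exact absurd hptaq (not_le_of_gt hlt)
          · exact hdom p (Or.inr hp')

-- the two selection phases agree, group by group
theorem pvAlign (board : List (List String)) :
    ∀ (SW : List String) (P : List (List Char × List (Int × Int)))
      (acc : List (List (Int × Int))),
    List.Pairwise (fun a b => pvKey a ≤ pvKey b) P →
    (∀ x ∈ P, (∃ w ∈ SW, x.1 = w.toList) ∧ pvCand board x.1 x.2) →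
    (∀ w ∈ SW, ∀ p, pvCand board w.toList p → (w.toList, p) ∈ P) →
    List.Pairwise (· < ·) SW →
    (match P with
      | [] => acc
      | x :: rest => scanOuter x.1 x.2 rest acc)
    = SW.foldl (fun res w => match pvBBest board w with
        | none => res
        | some b => res ++ [b]) acc := by
  intro SW
  induction SW with
  | nil =>
    intro P acc hPw hsound hcomplete hSW
    cases P with
    | nil => simp
    | cons x rest =>
      obtain ⟨⟨w, hw, -⟩, -⟩ := hsound x (by simp)
      exact absurd hw List.not_mem_nil
  | cons w SW' ih =>
    intro P acc hPw hsound hcomplete hSW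
    have hwle : ∀ y ∈ P, w.toList ≤ y.1 := by
      intro y hy
      obtain ⟨⟨w', hw', hy1⟩, -⟩ := hsound y hy
      rcases List.mem_cons.mp hw' with rfl | hw'
      · rw [hy1]
      · have : w < w' := (List.pairwise_cons.mp hSW).1 w' hw'
        rw [hy1]
        exact le_of_lt (String.lt_iff_toList_lt.mp this)
    rw [List.foldl_cons]
    cases hb : pvBBest board w with
    | none =>
      have hSempty : ∀ p, ¬ pvCand board w.toList p := by
        intro p hp
        have hspec := pvBBest_spec board w
        rw [hb] at hspec
        rcases hspec.2.1 p hp with h | h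
        · exact absurd h.symm (by simp)
        · exact h
      have hsound' : ∀ x ∈ P, (∃ w' ∈ SW', x.1 = w'.toList) ∧ pvCand board x.1 x.2 := by
        intro x hx
        obtain ⟨⟨w', hw', hx1⟩, hc⟩ := hsound x hx
        rcases List.mem_cons.mp hw' with rfl | hw'
        · exact absurd (hx1 ▸ hc) (hSempty x.2)
        · exact ⟨⟨w', hw', hx1⟩, hc⟩
      exact ih P acc hPw hsound'
        (fun w' hw' p hp => hcomplete w' (by simp [hw']) p hp) (hSW.sublist (List.sublist_cons_self _ _))
    | some b =>
      have hbS : pvCand board w.toList b := pvBestOf_some_mem (pvBBest_spec board w) hb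
      have hbP : (w.toList, b) ∈ P := hcomplete w (by simp) b hbS
      cases P with
      | nil => exact absurd hbP List.not_mem_nil
      | cons x0 rest =>
        have hminP : ∀ y ∈ x0 :: rest, pvKey x0 ≤ pvKey y := by
          intro y hy
          rcases List.mem_cons.mp hy with rfl | hy
          · exact le_rfl
          · exact (List.pairwise_cons.mp hPw).1 y hy
        have hx01 : x0.1 = w.toList := by
          have h1 : w.toList ≤ x0.1 := hwle x0 (by simp)
          have h2 : pvKey x0 ≤ pvKey (w.toList, b) := hminP _ hbP
          rw [pvKey, pvKey, Prod.Lex.toLex_le_toLex] at h2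
          rcases h2 with h2 | ⟨h2, -⟩
          · exact le_antisymm (le_of_lt h2) h1
          · exact h2
        set g := rest.takeWhile (fun y => y.1 == w.toList) with hgdef
        set P' := rest.dropWhile (fun y => y.1 == w.toList) with hP'def
        have hgP' : g ++ P' = rest := List.takeWhile_append_dropWhile
        have hgmem : ∀ y ∈ g, y.1 = w.toList := by
          intro y hy
          have := List.mem_takeWhile_imp hy
          simpa using this
        have hrest_sub : rest.Sublist (x0 :: rest) := List.sublist_cons_self _ _
        have hP'sub : P'.Sublist (x0 :: rest) :=
          ((List.dropWhile_sublist _).trans hrest_sub)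
        have hP'ne : ∀ y ∈ P', y.1 ≠ w.toList := by
          intro y hy
          cases hP'c : P' with
          | nil => rw [hP'c] at hy; exact absurd hy List.not_mem_nil
          | cons y0 t0 =>
            have hy0 : y0.1 ≠ w.toList := by
              have := List.head_dropWhile_not (fun y => y.1 == w.toList)
                (l := rest) (by rw [← hP'def, hP'c]; simp)
              simp only [← hP'def, hP'c, List.head_cons] at this
              simpa using this
            rw [hP'c] at hy
            rcases List.mem_cons.mp hy with rfl | hy
            · exact hy0
            · intro hcontra
              have hP'w : List.Pairwise (fun a b => pvKey a ≤ pvKey b) (y0 :: t0) := by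
                rw [← hP'c]
                exact hPw.sublist hP'sub
              have hk : pvKey y0 ≤ pvKey y := (List.pairwise_cons.mp hP'w).1 y hy
              rw [pvKey, pvKey, Prod.Lex.toLex_le_toLex] at hk
              have hy0ge : w.toList ≤ y0.1 := hwle y0 (hP'sub.mem (by rw [hP'c]; simp))
              rcases hk with hk | ⟨hk, -⟩
              · rw [hcontra] at hk
                exact absurd (lt_of_lt_of_le hk hy0ge) (lt_irrefl _)
              · exact hy0 (hk.trans hcontra)
        -- the chosen path of the first group is exactly B's best for w
        have hx0g : (x0 :: g).Pairwise (fun a b => pvKey a ≤ pvKey b) :=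
          hPw.sublist (List.Sublist.cons₂ x0 (List.takeWhile_prefix _).sublist)
        have hkeys : List.Pairwise (fun a b => pvPathKey a ≤ pvPathKey b)
            (x0.2 :: g.map (fun y => y.2)) := by
          have : (x0.2 :: g.map (fun y => y.2)) = (x0 :: g).map (fun y => y.2) := by simp
          rw [this, List.pairwise_map]
          refine hx0g.imp_of_mem ?_
          intro a b ha hb hab
          have ha1 : a.1 = w.toList := by
            rcases List.mem_cons.mp ha with rfl | ha
            · exact hx01
            · exact hgmem a ha
          have hb1 : b.1 = w.toList := by
            rcases List.mem_cons.mp hb with rfl | hb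
            · exact hx01
            · exact hgmem b hb
          rw [pvKey, pvKey, Prod.Lex.toLex_le_toLex] at hab
          rcases hab with hab | ⟨-, hab⟩
          · rw [ha1, hb1] at hab
            exact absurd hab (lt_irrefl _)
          · exact hab
        have hfold := foldBest_isMax (g.map (fun y => y.2)) x0.2 hkeys
        have hfoldeq : g.foldl (fun b x => if x.2.length > b.length then x.2 else b) x0.2 =
            (g.map (fun y => y.2)).foldl (fun b q => if q.length > b.length then q else b) x0.2 := by
          rw [List.foldl_map]
        have hSeq : ∀ p, (p = x0.2 ∨ p ∈ g.map (fun y => y.2)) ↔ pvCand board w.toList p := by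
          intro p
          constructor
          · rintro (rfl | hp)
            · have := (hsound x0 (by simp)).2
              rwa [hx01] at this
            · obtain ⟨y, hyg, rfl⟩ := List.mem_map.mp hp
              have hymem : y ∈ x0 :: rest := by
                rw [← hgP']
                exact List.mem_cons_of_mem _ (List.mem_append_left _ hyg)
              have := (hsound y hymem).2
              rwa [hgmem y hyg] at this
          · intro hC
            have := hcomplete w (by simp) p hC
            rcases List.mem_cons.mp this with hx0eq | hrest
            · left
              rw [← hx0eq]
            · rw [← hgP'] at hrest
              rcases List.mem_append.mp hrest with hg' | hp'
              · right
                exact List.mem_map.mpr ⟨(w.toList, p), hg', rfl⟩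
              · exact absurd rfl (hP'ne _ hp')
        have hmax : pvIsMax (fun p => pvCand board w.toList p)
            (g.foldl (fun b x => if x.2.length > b.length then x.2 else b) x0.2) := by
          rw [hfoldeq]
          exact ⟨(hSeq _).mp hfold.1, fun p hp => hfold.2 p ((hSeq p).mpr hp)⟩
        have hbfold : b = g.foldl (fun b x => if x.2.length > b.length then x.2 else b) x0.2 := by
          have := pvBestOf_isMax_eq (pvBBest_spec board w) hmax
          rw [hb] at this
          exact Option.some_inj.mp this
        -- hand the rest of the list to the induction hypothesis
        have hscan : scanInner x0.1 x0.2 rest =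
            (g.foldl (fun b x => if x.2.length > b.length then x.2 else b) x0.2, P') := by
          rw [← hgP']
          refine scanInner_group x0.1 g P' x0.2 ?_ ?_
          · intro x hx
            rw [hgmem x hx, hx01]
          · intro y hy
            rw [hx01]
            apply hP'ne y
            cases hP'c : P' with
            | nil => rw [hP'c] at hy; exact absurd hy (by simp)
            | cons y0 t0 =>
              rw [hP'c] at hy
              simp only [List.head?_cons, Option.some_inj] at hy
              subst hy
              exact List.mem_cons_self
        have hsound' : ∀ x ∈ P', (∃ w' ∈ SW', x.1 = w'.toList) ∧ pvCand board x.1 x.2 := by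
          intro x hx
          obtain ⟨⟨w', hw', hx1⟩, hc⟩ := hsound x (hP'sub.mem hx)
          rcases List.mem_cons.mp hw' with rfl | hw'
          · exact absurd hx1 (hP'ne x hx)
          · exact ⟨⟨w', hw', hx1⟩, hc⟩
        have hcomplete' : ∀ w' ∈ SW', ∀ p, pvCand board w'.toList p → (w'.toList, p) ∈ P' := by
          intro w' hw' p hp
          have hwne : w.toList ≠ w'.toList := by
            have hlt : w < w' := (List.pairwise_cons.mp hSW).1 w' hw'
            exact (String.lt_iff_toList_lt.mp hlt).ne
          have := hcomplete w' (by simp [hw']) p hp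
          rcases List.mem_cons.mp this with hx0eq | hrest
          · exfalso
            apply hwne
            rw [hx01.symm, ← hx0eq]
          · rw [← hgP'] at hrest
            rcases List.mem_append.mp hrest with hg' | hp'
            · exfalso
              exact hwne ((hgmem _ hg').symm)
            · exact hp'
        have hih := ih P' (acc ++ [b]) (hPw.sublist hP'sub) hsound' hcomplete'
          (hSW.sublist (List.sublist_cons_self _ _))
        dsimp only
        rw [scanOuter.eq_def]
        split
        · rename_i best hsc
          rw [hscan] at hsc
          have h1 : g.foldl (fun b x => if x.2.length > b.length then x.2 else b) x0.2 = best :=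
            (Prod.mk.injEq _ _ _ _).mp hsc |>.1
          have h2 : P' = [] := (Prod.mk.injEq _ _ _ _).mp hsc |>.2
          rw [h2] at hih
          simp only [] at hih
          rw [← h1, ← hbfold]
          exact hih
        · rename_i best y t hsc
          rw [hscan] at hsc
          have h1 : g.foldl (fun b x => if x.2.length > b.length then x.2 else b) x0.2 = best :=
            (Prod.mk.injEq _ _ _ _).mp hsc |>.1
          have h2 : P' = y :: t := (Prod.mk.injEq _ _ _ _).mp hsc |>.2
          rw [h2] at hih
          simp only [] at hih
          rw [← h1, ← hbfold]
          exact hih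

-- ===== VERDICT (by name: the statement is the Claim_ definition above) =====
theorem max_score_paths_spec : Claim_equal_max_score_paths := by
  unfold Claim_equal_max_score_paths
  intro board words _ _
  unfold Spec_max_score_paths
  rw [max_score_paths_alt_eq]
  have halign := pvAlign board (PySem.List.sorted (PySem.Set.ofList words) (fun x => x))
      (PySem.List.sorted (genAll board words) pvKey) []
      (PySem.List.sorted_pairwise _ _) ?sound ?complete (PySem.List.sorted_ofList_pairwise_lt words)
  case sound =>
    intro x hx
    rw [PySem.List.mem_sorted] at hx
    obtain ⟨hx1, hc⟩ := (genAll_mem_iff board words x).mp hx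
    obtain ⟨w, hw, hx1'⟩ := List.mem_map.mp hx1
    exact ⟨⟨w, by rw [PySem.List.mem_sorted, PySem.Set.mem_ofList]; exact hw, hx1'.symm⟩, hc⟩
  case complete =>
    intro w hw p hp
    rw [PySem.List.mem_sorted]
    apply (genAll_mem_iff board words (w.toList, p)).mpr
    refine ⟨List.mem_map.mpr ⟨w, ?_, rfl⟩, hp⟩
    rw [PySem.List.mem_sorted, PySem.Set.mem_ofList] at hw
    exact hw
  unfold max_score_paths
  exact halign
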